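-- pv_equiv track=rewrite | github.com/ggako/testYourMemory | memory.py | coordinateToIndexMap
-- ===== SOURCE A (Python) =====
-- def coordinateToIndexMap(n):
--     """
--     Creates a dictionary which maps a coordinate to its i and j index board position
--
--     Parameters:
--         size (n): size of the board
--
--     Returns:
--         ciMapDict (dict): Dictionary which maps a "coordinate" to its i and j index board position
--     """
--     ciMapDict = {}
--     index = 1
--     for r in range(n):
--         for c in range(n):
--             ciMapDict[index] = (r, c)
--             index += 1
--     return ciMapDict
-- ===== SOURCE B (Python) =====
-- def coordinateToIndexMap(n):
--     """Maps each key 1..n*n to its board position, derived arithmetically from the flat index."""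
--     return {i + 1: (i // n, i % n) for i in range(n * n)}
-- ===== Notes on version B (the rewrite author's own statement) =====
-- stated objective: simpler
-- what changed: Replaces the nested row/column loops with a separate running counter by a single dict comprehension over the flat range of the board area, deriving row and column arithmetically as i // n and i % n; Pre_ excludes negative board sizes, which lie outside the function's natural domain (A accidentally returns an empty dict there while B's divmod over the positive square n*n yields a meaningless mapping).
-- outside the precondition, e.g. on coordinateToIndexMap(-2): A returns {}, B returns {1: (0, 0), 2: (-1, -1), 3: (-1, 0), 4: (-2, -1)}
import Mathlib
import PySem

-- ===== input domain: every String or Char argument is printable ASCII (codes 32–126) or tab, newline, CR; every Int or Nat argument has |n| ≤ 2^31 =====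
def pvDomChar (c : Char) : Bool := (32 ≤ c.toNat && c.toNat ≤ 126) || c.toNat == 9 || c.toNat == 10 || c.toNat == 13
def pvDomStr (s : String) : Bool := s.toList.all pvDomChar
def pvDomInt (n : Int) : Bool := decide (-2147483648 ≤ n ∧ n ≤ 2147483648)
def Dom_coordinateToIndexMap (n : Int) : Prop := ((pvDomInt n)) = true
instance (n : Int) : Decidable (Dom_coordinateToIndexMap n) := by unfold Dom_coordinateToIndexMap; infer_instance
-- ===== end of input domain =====

-- B replaces A's nested row/column loops and running counter by one flat dict comprehension
-- whose coordinates are recovered arithmetically (i // n, i % n); objective: simpler.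

-- ===== PORT A =====
-- ciMapDict = {}; index = 1; for r in range(n): for c in range(n): ciMapDict[index] = (r, c); index += 1
def coordinateToIndexMap (n : Int) : List (Int × Int × Int) :=
  (((PySem.List.pyRange 0 n 1).foldl
      (fun (s : PySem.Dict Int (Int × Int) × Int) r =>
        (PySem.List.pyRange 0 n 1).foldl
          (fun (s : PySem.Dict Int (Int × Int) × Int) c => (s.1.insert s.2 (r, c), s.2 + 1)) s)
      (PySem.Dict.empty, 1)).1).items

-- ===== PORT B =====
-- {i + 1: (i // n, i % n) for i in range(n * n)}
def coordinateToIndexMap_alt (n : Int) : List (Int × Int × Int) :=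
  ((PySem.List.pyRange 0 (n * n) 1).foldl
      (fun (d : PySem.Dict Int (Int × Int)) i =>
        d.insert (i + 1) (PySem.Int.floordiv i n, PySem.Int.mod i n))
      PySem.Dict.empty).items

-- ===== PRECONDITION & SPEC =====
-- Pre_ excludes negative board sizes: outside the function's natural domain, where A's empty
-- dict is an accident of range(n) and B's divmod pass over the positive square is meaningless.
def Pre_coordinateToIndexMap (n : Int) : Prop := 0 ≤ n
instance (n : Int) : Decidable (Pre_coordinateToIndexMap n) := by unfold Pre_coordinateToIndexMap; infer_instance
def pvWitness_coordinateToIndexMap : Int := 3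

def Spec_coordinateToIndexMap (n : Int) (out : List (Int × Int × Int)) : Prop := out = coordinateToIndexMap_alt n
instance (n : Int) (out : List (Int × Int × Int)) : Decidable (Spec_coordinateToIndexMap n out) := by unfold Spec_coordinateToIndexMap; infer_instance

-- ===== CLAIM (what is proved, stated in full; the proofs are below) =====
def Claim_equal_coordinateToIndexMap : Prop := ∀ (n : Int), Dom_coordinateToIndexMap n → Pre_coordinateToIndexMap n → Spec_coordinateToIndexMap n (coordinateToIndexMap n)

-- ===== LEMMAS AND PROOFS =====

-- B's fold inserts the fresh distinct keys i+1 in order, so its items list is a map over the range.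
theorem alt_eq_map (n : Int) :
    coordinateToIndexMap_alt n =
      (PySem.List.pyRange 0 (n * n) 1).map
        (fun i => (i + 1, (PySem.Int.floordiv i n, PySem.Int.mod i n))) := by
  unfold coordinateToIndexMap_alt
  rw [PySem.Dict.items_foldl_insert_fresh (k := fun i => i + 1)]
  · rfl
  · intro a _; simp
  · exact List.Nodup.map (fun a b h => by omega) (PySem.List.nodup_pyRange_one 0 _)

-- A's inner loop, characterised: starting from a dict whose keys are all below idx,
-- it appends the pairs (idx + j, (r, l[j])) for the positions j of the row list.
theorem innerA (r : Int) (l : List Int) :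
    ∀ (d : PySem.Dict Int (Int × Int)) (idx : Int), (∀ k ∈ d.keys, k < idx) →
      l.foldl (fun (s : PySem.Dict Int (Int × Int) × Int) c => (s.1.insert s.2 (r, c), s.2 + 1)) (d, idx)
        = (PySem.Dict.mk (d.items ++ (List.range l.length).map
              (fun (j : Nat) => ((idx + (j : Int)), (r, l.getD j 0)))),
           idx + l.length) := by
  induction l with
  | nil => intro d idx h; simp
  | cons c cs ih =>
    intro d idx h
    simp only [List.foldl_cons]
    have hfresh : d.contains idx = false := by
      rw [PySem.Dict.contains_eq_decide_mem_keys]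
      simp only [decide_eq_false_iff_not]
      intro hm; exact absurd (h idx hm) (by omega)
    have hins : d.insert idx (r, c) = PySem.Dict.mk (d.items ++ [(idx, (r, c))]) := by
      apply PySem.Dict.ext
      rw [PySem.Dict.items_insert_of_not_contains _ _ hfresh]
    rw [hins, ih _ (idx + 1) ?hk]
    case hk =>
      intro k hk
      simp only [PySem.Dict.keys, List.map_append, List.mem_append,
        List.mem_map] at hk
      rcases hk with ⟨p, hp, rfl⟩ | hk
      · have : p.1 ∈ d.keys := by
          simp only [PySem.Dict.keys, List.mem_map]; exact ⟨p, hp, rfl⟩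
        have := h p.1 this; omega
      · simp at hk; omega
    refine Prod.ext ?_ (by simp; ring)
    simp only [List.append_assoc, List.length_cons]
    congr 1
    rw [List.range_succ_eq_map]
    simp only [List.map_cons, List.map_map, List.singleton_append]
    congr 1
    refine List.cons_eq_cons.mpr ⟨?_, ?_⟩
    · simp
    apply List.map_congr_left
    intro j hj
    simp only [Function.comp_apply, List.getD_cons_succ]
    refine Prod.ext ?_ rfl
    push_cast; ring

-- the per-row pair blocks A's outer loop accumulates, row list rs starting at key idx
def rowsOf (m : Nat) : List Int → Int → List (Int × Int × Int)
  | [], _ => []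
  | r :: rs, idx =>
      (List.range m).map (fun (j : Nat) => (idx + (j : Int), (r, (j : Int)))) ++ rowsOf m rs (idx + m)

-- A's outer loop, characterised: each processed row appends its m pairs and advances idx by m.
theorem outer_fold (n : Int) (m : Nat) (hm : m = n.toNat) :
    ∀ (rs : List Int) (d : PySem.Dict Int (Int × Int)) (idx : Int), (∀ k ∈ d.keys, k < idx) →
      rs.foldl (fun (s : PySem.Dict Int (Int × Int) × Int) r =>
          (PySem.List.pyRange 0 n 1).foldl
            (fun (s : PySem.Dict Int (Int × Int) × Int) c => (s.1.insert s.2 (r, c), s.2 + 1)) s)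
        (d, idx)
        = (PySem.Dict.mk (d.items ++ rowsOf m rs idx), idx + rs.length * m) := by
  have hlen : (PySem.List.pyRange 0 n 1).length = m := by
    rw [PySem.List.pyRange_one]; simp; omega
  have hget : ∀ j < m, (PySem.List.pyRange 0 n 1).getD j 0 = (j : Int) := by
    intro j hj
    rw [PySem.List.pyRange_one]
    rw [List.getD_eq_getElem _ _ (by simp [hm]; omega)]
    simp
  intro rs
  induction rs with
  | nil => intro d idx h; simp [rowsOf]
  | cons r rs ih =>
    intro d idx h
    simp only [List.foldl_cons]
    rw [innerA r _ d idx h, hlen]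
    have hmapeq : (List.range m).map (fun (j : Nat) => ((idx + (j : Int)),
          (r, (PySem.List.pyRange 0 n 1).getD j 0)))
        = (List.range m).map (fun (j : Nat) => (idx + (j : Int), (r, (j : Int)))) := by
      apply List.map_congr_left
      intro j hj
      rw [hget j (List.mem_range.mp hj)]
    rw [hmapeq, ih _ (idx + m) ?hk]
    case hk =>
      intro k hk
      simp only [PySem.Dict.keys, List.map_append, List.mem_append,
        List.mem_map] at hk
      rcases hk with ⟨p, hp, rfl⟩ | hk
      · have : p.1 ∈ d.keys := by
          simp only [PySem.Dict.keys, List.mem_map]; exact ⟨p, hp, rfl⟩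
        have := h p.1 this; omega
      · simp at hk; obtain ⟨j, hj, rfl⟩ := hk; omega
    refine Prod.ext ?_ (by simp; push_cast; ring)
    simp [rowsOf]

-- splitting the flat index: range (a*m) traversed row by row
theorem range_mul_flat (m : Nat) (g : Nat → (Int × Int × Int)) :
    ∀ (a : Nat), (List.range (a * m)).map g
      = (List.range a).flatMap (fun r => (List.range m).map (fun c => g (r * m + c))) := by
  intro a
  induction a with
  | zero => simp
  | succ a ih =>
    have h1 : (a + 1) * m = a * m + m := by ring
    rw [h1, List.range_add, List.map_append, ih, List.range_succ, List.flatMap_append]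
    simp [List.map_map, Function.comp, Nat.add_comm]

theorem rowsOf_append (m : Nat) :
    ∀ (xs ys : List Int) (idx : Int),
      rowsOf m (xs ++ ys) idx = rowsOf m xs idx ++ rowsOf m ys (idx + xs.length * m) := by
  intro xs
  induction xs with
  | nil => intro ys idx; simp [rowsOf]
  | cons x xs ih =>
    intro ys idx
    simp only [List.cons_append, rowsOf, ih, List.append_assoc, List.length_cons]
    congr 3
    push_cast; ring

-- rowsOf over the row list 0..a-1 is the row-by-row flatMap of the pair blocks
theorem rowsOf_range (m : Nat) :
    ∀ (a : Nat) (idx : Int),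
      rowsOf m ((List.range a).map (fun (t : Nat) => (t : Int))) idx
        = (List.range a).flatMap (fun (t : Nat) =>
            (List.range m).map (fun (j : Nat) =>
              (idx + (t : Int) * (m : Int) + (j : Int), ((t : Int), (j : Int))))) := by
  intro a
  induction a with
  | zero => intro idx; simp [rowsOf]
  | succ a ih =>
    intro idx
    rw [List.range_succ, List.map_append, rowsOf_append, ih, List.flatMap_append]
    congr 1
    simp only [List.map_cons, List.map_nil, List.flatMap_cons, List.flatMap_nil,
      List.append_nil, rowsOf, List.length_map, List.length_range]

-- A (for 0 < n) is the row-by-row flat list of pairs (1 + r*n + c, (r, c)).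
theorem outerA (n : Int) (hn : 0 < n) :
    coordinateToIndexMap n
      = (List.range n.toNat).flatMap (fun (r : Nat) =>
          (List.range n.toNat).map (fun (c : Nat) =>
            ((1 : Int) + (r : Int) * ((n.toNat : Nat) : Int) + (c : Int), ((r : Int), (c : Int))))) := by
  unfold coordinateToIndexMap
  rw [outer_fold n n.toNat rfl _ _ _ (by simp [PySem.Dict.keys, PySem.Dict.empty])]
  have hcast : ((n.toNat : Nat) : Int) = n := by omega
  have hrows : PySem.List.pyRange 0 n 1 = (List.range n.toNat).map (fun (t : Nat) => (t : Int)) := by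
    have h := PySem.List.pyRange_zero_natCast n.toNat
    rw [hcast] at h
    exact h
  rw [hrows, rowsOf_range n.toNat n.toNat 1]
  simp [PySem.Dict.empty]

-- B (for 0 < n) is the same flat list: the flat index i = r*n + c splits back via floordiv/mod.
theorem flat_split (n : Int) (hn : 0 < n) :
    coordinateToIndexMap_alt n
      = (List.range n.toNat).flatMap (fun (r : Nat) =>
          (List.range n.toNat).map (fun (c : Nat) =>
            ((1 : Int) + (r : Int) * ((n.toNat : Nat) : Int) + (c : Int), ((r : Int), (c : Int))))) := by
  rw [alt_eq_map]
  have hsq : n * n = ((n.toNat * n.toNat : Nat) : Int) := by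
    have h : ((n.toNat : Nat) : Int) = n := by omega
    push_cast
    rw [h]
  rw [hsq, PySem.List.pyRange_zero_natCast, List.map_map]
  rw [range_mul_flat n.toNat _ n.toNat]
  apply List.flatMap_congr
  intro r hr
  apply List.map_congr_left
  intro c hc
  simp only [Function.comp_apply]
  have hc' : c < n.toNat := List.mem_range.mp hc
  have hn' : ((n.toNat : Nat) : Int) = n := by omega
  have hfd : PySem.Int.floordiv ((r * n.toNat + c : Nat) : Int) n = (r : Int) := by
    rw [PySem.Int.floordiv_eq_iff_of_pos hn]
    constructor
    · push_cast; nlinarith [hn']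
    · push_cast
      have : ((c : Int)) < ((n.toNat : Nat) : Int) := by exact_mod_cast hc'
      nlinarith [hn', this]
  have hmd : PySem.Int.mod ((r * n.toNat + c : Nat) : Int) n = (c : Int) := by
    have hdm := PySem.Int.floordiv_mul_add_mod ((r * n.toNat + c : Nat) : Int) n
    rw [hfd] at hdm
    push_cast at hdm ⊢
    nlinarith [hdm, hn']
  refine Prod.ext ?_ (Prod.ext (by rw [hfd]) (by rw [hmd]))
  push_cast; ring

-- ===== VERDICT (by name: the statement is the Claim_ definition above) =====
theorem coordinateToIndexMap_spec : Claim_equal_coordinateToIndexMap := by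
  intro n _ hpre
  unfold Spec_coordinateToIndexMap
  by_cases hn : 0 < n
  · rw [outerA n hn, flat_split n hn]
  · have h0 : n = 0 := by unfold Pre_coordinateToIndexMap at hpre; omega
    subst h0
    rfl
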